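-- pv_equiv track=rewrite | github.com/feoshnce/PIA-Tubes-IF2224 | src/utils/error_context.py | index_to_line_col
-- ===== SOURCE A (Python) =====
-- from typing import Optional, Tuple, Any
--
-- def index_to_line_col(source: str, index: int) -> Tuple[int, int]:
--     """
--     Convert 0-based character index into (line, col), both 1-based.
--     Mirrors Reader.set_position logic.
--     """
--     if index < 0:
--         index = 0
--     if index > len(source):
--         index = len(source)
--
--     line = 1
--     col = 1
--     for i in range(index):
--         if source[i] == "\n":
--             line += 1
--             col = 1
--         else:
--             col += 1
--     return line, col
-- ===== SOURCE B (Python) =====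
-- def index_to_line_col(source: str, index: int):
--     """
--     Convert 0-based character index into (line, col), both 1-based.
--     Line = newline count in the prefix + 1; column found by scanning the
--     prefix backwards until the nearest newline.
--     """
--     index = max(0, min(index, len(source)))
--     prefix = source[:index]
--     col = 1
--     for ch in reversed(prefix):
--         if ch == "\n":
--             break
--         col += 1
--     return prefix.count("\n") + 1, col
-- ===== Notes on version B (the rewrite author's own statement) =====
-- stated objective: alternative
-- what changed: Replaces the forward char-by-char loop with two running counters by a prefix-slice decomposition: line is the newline count of the prefix (one str.count call), column comes from a backward scan of the prefix that stops at the nearest newline.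
import Mathlib
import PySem

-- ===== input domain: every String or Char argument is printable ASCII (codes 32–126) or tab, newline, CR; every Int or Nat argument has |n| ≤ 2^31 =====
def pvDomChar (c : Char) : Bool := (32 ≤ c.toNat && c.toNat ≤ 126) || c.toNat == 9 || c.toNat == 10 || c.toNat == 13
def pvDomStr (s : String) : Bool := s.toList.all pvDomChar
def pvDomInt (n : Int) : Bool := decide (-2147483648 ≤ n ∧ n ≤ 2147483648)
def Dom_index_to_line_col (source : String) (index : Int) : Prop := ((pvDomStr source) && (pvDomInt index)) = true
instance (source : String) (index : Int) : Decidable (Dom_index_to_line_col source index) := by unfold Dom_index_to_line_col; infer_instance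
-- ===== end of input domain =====

-- B replaces A's forward two-counter loop by a prefix decomposition: line = newline count
-- of the prefix, column via a backward scan stopping at the nearest newline (alternative).

-- ===== PORT A =====
def index_to_line_col (source : String) (index : Int) : Int × Int :=
  let index1 : Int := if index < 0 then 0 else index
  let index2 : Int := if index1 > PySem.Str.len source then PySem.Str.len source else index1
  (PySem.List.pyRange 0 index2 1).foldl
    (fun (lc : Int × Int) i =>
      if PySem.List.pyGetD source.toList i ' ' = '\n' then (lc.1 + 1, 1) else (lc.1, lc.2 + 1))
    (1, 1)

-- ===== PORT B =====
-- 'for ch in reversed(prefix): if ch == "\n": break; col += 1' as structural recursion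
def colBack (cs : List Char) (col : Int) : Int :=
  match cs with
  | [] => col
  | c :: t => if c = '\n' then col else colBack t (col + 1)

def index_to_line_col_alt (source : String) (index : Int) : Int × Int :=
  let index' : Int := max 0 (min index (PySem.Str.len source))
  let pfx := PySem.List.slice source.toList none (some index')
  ((pfx.count '\n' : Int) + 1, colBack pfx.reverse 1)

-- ===== PRECONDITION & SPEC =====
def Spec_index_to_line_col (source : String) (index : Int) (out : Int × Int) : Prop := out = index_to_line_col_alt source index
instance (source : String) (index : Int) (out : Int × Int) : Decidable (Spec_index_to_line_col source index out) := by unfold Spec_index_to_line_col; infer_instance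

-- ===== CLAIM (what is proved, stated in full; the proofs are below) =====
def Claim_equal_index_to_line_col : Prop := ∀ (source : String) (index : Int), Dom_index_to_line_col source index → Spec_index_to_line_col source index (index_to_line_col source index)

-- ===== LEMMAS AND PROOFS =====

theorem colBack_succ (cs : List Char) (x : Int) :
    colBack cs (x + 1) = colBack cs x + 1 := by
  induction cs generalizing x with
  | nil => simp [colBack]
  | cons c t ih => simp only [colBack]; split_ifs <;> simp [ih]

-- the core loop characterisation: A's fold over the prefix, expressed by count / colBack
theorem fold_char (cs : List Char) (a b : Int) :
    cs.foldl
      (fun (lc : Int × Int) (c : Char) =>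
        if c = '\n' then (lc.1 + 1, (1 : Int)) else (lc.1, lc.2 + 1)) (a, b)
      = (a + (cs.count '\n' : Int),
         if '\n' ∈ cs then colBack cs.reverse 1 else b + cs.length) := by
  induction cs using List.reverseRecOn generalizing a b with
  | nil => simp
  | append_singleton ds c ih =>
      rw [List.foldl_append, ih, List.foldl_cons, List.foldl_nil]
      by_cases hc : c = '\n'
      · subst hc
        simp [List.count_append, List.reverse_append, colBack]
        ring
      · have hcnt : List.count '\n' (ds ++ [c]) = List.count '\n' ds := by
          rw [List.count_append]
          have : List.count '\n' [c] = 0 :=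
            List.count_eq_zero.mpr (by simpa using fun h : '\n' = c => hc h.symm)
          omega
        have hmem : ('\n' ∈ ds ++ [c]) ↔ '\n' ∈ ds := by
          simp only [List.mem_append, List.mem_singleton, or_iff_left_iff_imp]
          exact fun h => absurd h.symm hc
        have hrev : (ds ++ [c]).reverse = c :: ds.reverse := by simp
        rw [if_neg hc, hcnt, hrev]
        simp only [colBack, if_neg hc]
        rw [show (1 : Int) + 1 = 1 + 1 from rfl, colBack_succ ds.reverse 1]
        by_cases hm : '\n' ∈ ds
        · simp [hmem, hm]
        · simp [hmem, hm]
          ring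

theorem colBack_no_newline (cs : List Char) (h : '\n' ∉ cs) (x : Int) :
    colBack cs x = x + cs.length := by
  induction cs generalizing x with
  | nil => simp [colBack]
  | cons c t ih =>
      simp only [List.mem_cons, not_or] at h
      simp only [colBack, if_neg (fun h' : c = '\n' => h.1 h'.symm)]
      rw [ih h.2]; simp only [List.length_cons]; push_cast; ring

theorem pyRange_fold_take (cs : List Char) (k : Nat) (hk : k ≤ cs.length)
    (f : (Int × Int) → Char → (Int × Int)) (init : Int × Int) :
    (PySem.List.pyRange 0 (k : Int) 1).foldl
        (fun acc j => f acc (PySem.List.pyGetD cs j ' ')) init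
      = (cs.take k).foldl f init := by
  have hlen : PySem.List.len (cs.take k) = (k : Int) := by
    simp [PySem.List.len, List.length_take, Nat.min_eq_left hk]
  have key := PySem.List.foldl_pyRange_pyGetD (cs.take k) ' ' f init (a := 0) (le_refl 0)
  rw [hlen] at key
  simp only [Int.toNat_zero, List.drop_zero] at key
  rw [← key]
  apply PySem.List.foldl_congr_mem
  intro acc j hj
  have hj' := (PySem.List.mem_pyRange_iff_of_pos (a := 0) (b := (k : Int)) (s := 1)
      (by norm_num) j).mp hj
  have h0 : 0 ≤ j := hj'.1
  have h1 : j < (k : Int) := hj'.2.1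
  congr 1
  rw [PySem.List.pyGetD_eq_getElem cs ' ' h0 (by omega),
      PySem.List.pyGetD_eq_getElem (cs.take k) ' ' h0 (by rw [List.length_take]; omega)]
  simp [List.getElem_take]

-- ===== VERDICT (by name: the statement is the Claim_ definition above) =====
theorem index_to_line_col_spec : Claim_equal_index_to_line_col := by
  intro source index _
  unfold Spec_index_to_line_col index_to_line_col index_to_line_col_alt
  have hlen : PySem.Str.len source = (source.toList.length : Int) := by
    simp [PySem.Str.len_eq]
  set cs := source.toList with hcs
  set j : Nat := (max 0 (min index (cs.length : Int))).toNat with hj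
  have hjle : j ≤ cs.length := by omega
  have hclampB : max 0 (min index (PySem.Str.len source)) = (j : Int) := by
    rw [hlen]; omega
  have hclampA :
      (if (if index < 0 then 0 else index) > PySem.Str.len source then PySem.Str.len source
       else (if index < 0 then 0 else index)) = (j : Int) := by
    rw [hlen]; split_ifs <;> omega
  dsimp only
  rw [hclampA, hclampB]
  have hslice : PySem.List.slice cs none (some (j : Int)) = cs.take j :=
    PySem.List.slice_to_natCast cs j
  rw [hslice,
    pyRange_fold_take cs j hjle
      (fun (lc : Int × Int) (c : Char) =>
        if c = '\n' then (lc.1 + 1, (1 : Int)) else (lc.1, lc.2 + 1)) (1, 1),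
    fold_char]
  by_cases hm : '\n' ∈ cs.take j
  · simp [hm]; ring
  · have h2 := colBack_no_newline (List.take j cs).reverse (by simpa using hm) 1
    simp [hm, h2]
    omega
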